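-- pv_equiv track=rewrite | github.com/MrBrantCode/unitest_baseline | mut_generate/mist_train_cf/cf_68875/solution.py | third_unique_char
-- ===== SOURCE A (Python) =====
-- def third_unique_char(phrase):
--     unique_chars = []
--     for c in phrase:
--         if c not in unique_chars:
--             unique_chars.append(c)
--         if len(unique_chars) == 3:
--             return unique_chars[2]
--
--     return "Error: not enough unique characters"
-- ===== SOURCE B (Python) =====
-- def third_unique_char(phrase):
--     # positions of first occurrences, smallest three decide the answer
--     firsts = sorted(phrase.index(c) for c in set(phrase))
--     if len(firsts) >= 3:
--         return phrase[firsts[2]]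
--     return "Error: not enough unique characters"
-- ===== Notes on version B (the rewrite author's own statement) =====
-- stated objective: alternative
-- what changed: Instead of an online dedup scan with early exit, B computes the first-occurrence index of every distinct character with set and str.index, sorts these positions, and returns the character of the phrase at the third-smallest position.
import Mathlib
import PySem

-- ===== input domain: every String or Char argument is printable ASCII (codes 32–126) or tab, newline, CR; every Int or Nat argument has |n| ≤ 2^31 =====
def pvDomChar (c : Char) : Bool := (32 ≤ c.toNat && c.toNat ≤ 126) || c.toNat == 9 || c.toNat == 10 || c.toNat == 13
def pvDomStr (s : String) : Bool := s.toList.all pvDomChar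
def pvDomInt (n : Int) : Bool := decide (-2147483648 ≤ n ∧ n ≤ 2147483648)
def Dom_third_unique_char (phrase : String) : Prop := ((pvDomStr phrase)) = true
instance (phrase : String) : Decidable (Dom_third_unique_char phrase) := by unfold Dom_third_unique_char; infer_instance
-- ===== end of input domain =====

-- B replaces A's online early-exit dedup scan by a positional algorithm: sort the
-- first-occurrence index of every distinct character and index the phrase at the
-- third smallest; objective: alternative.

-- ===== PORT A =====
-- early-exit loop over the characters, carrying the unique_chars accumulator;
-- 'if c not in unique_chars: unique_chars.append(c)' is PySem.Set.add
def third_unique_char_loop (cs : List Char) (unique_chars : List Char) : String :=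
  match cs with
  | [] => "Error: not enough unique characters"
  | c :: rest =>
    let unique_chars' := PySem.Set.add unique_chars c
    if unique_chars'.length = 3 then
      -- unique_chars[2]: in-range access (length is exactly 3 here)
      String.ofList [unique_chars'.getD 2 ' ']
    else
      third_unique_char_loop rest unique_chars'

def third_unique_char (phrase : String) : String :=
  third_unique_char_loop phrase.toList []

-- ===== PORT B =====
-- sorted(phrase.index(c) for c in set(phrase)); phrase.index(c) is always in range
-- since c ∈ phrase (so .getD 0 never fires), and phrase[firsts[2]] is an in-range
-- nonnegative index (getD ' ' never fires); sorting Nat indices with no key is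
-- order-independent, so consuming the Set's order here is exact.
def third_unique_char_alt (phrase : String) : String :=
  let cs := phrase.toList
  let firsts := PySem.List.sorted
    ((PySem.Set.ofList cs).map (fun c => (PySem.List.index? cs c).getD 0))
    (fun i => i) false
  if firsts.length ≥ 3 then String.ofList [cs.getD (firsts.getD 2 0) ' ']
  else "Error: not enough unique characters"

-- ===== PRECONDITION & SPEC =====
def Spec_third_unique_char (phrase : String) (out : String) : Prop := out = third_unique_char_alt phrase
instance (phrase : String) (out : String) : Decidable (Spec_third_unique_char phrase out) := by unfold Spec_third_unique_char; infer_instance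

-- ===== CLAIM (what is proved, stated in full; the proofs are below) =====
def Claim_equal_third_unique_char : Prop := ∀ (phrase : String), Dom_third_unique_char phrase → Spec_third_unique_char phrase (third_unique_char phrase)

-- ===== LEMMAS AND PROOFS =====

-- Set.ofList's fold only appends to its accumulator
theorem pv_foldl_add_append (cs : List Char) (acc : List Char) :
    ∃ t, cs.foldl PySem.Set.add acc = acc ++ t := by
  induction cs generalizing acc with
  | nil => exact ⟨[], by simp⟩
  | cons c rest ih =>
    simp only [List.foldl_cons]
    by_cases h : c ∈ acc
    · have heq : PySem.Set.add acc c = acc := by simp [PySem.Set.add, PySem.Set.contains, h]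
      rw [heq]; exact ih acc
    · have heq : PySem.Set.add acc c = acc ++ [c] := by simp [PySem.Set.add, PySem.Set.contains, h]
      rw [heq]
      rcases ih (acc ++ [c]) with ⟨t, ht⟩
      exact ⟨c :: t, by simpa using ht⟩

theorem pv_add_length (acc : List Char) (c : Char) :
    (PySem.Set.add acc c).length = acc.length ∨ (PySem.Set.add acc c).length = acc.length + 1 := by
  unfold PySem.Set.add; split <;> simp

-- A's early-exit scan equals "fold the rest, then check length ≥ 3 and index 2"
theorem pv_loop_eq (cs : List Char) (acc : List Char) (hlt : acc.length < 3) :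
    third_unique_char_loop cs acc =
      (if (cs.foldl PySem.Set.add acc).length ≥ 3 then
        String.ofList [(cs.foldl PySem.Set.add acc).getD 2 ' ']
       else "Error: not enough unique characters") := by
  induction cs generalizing acc with
  | nil => rw [third_unique_char_loop]; simp; omega
  | cons c rest ih =>
    rw [third_unique_char_loop]
    simp only [List.foldl_cons]
    by_cases h3 : (PySem.Set.add acc c).length = 3
    · rcases pv_foldl_add_append rest (PySem.Set.add acc c) with ⟨t, ht⟩
      have hlenfin : 3 ≤ (rest.foldl PySem.Set.add (PySem.Set.add acc c)).length := by
        rw [ht]; simp [h3]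
      have hget : (rest.foldl PySem.Set.add (PySem.Set.add acc c)).getD 2 ' '
          = (PySem.Set.add acc c).getD 2 ' ' := by
        rw [ht, List.getD_append]; omega
      rw [if_pos h3, if_pos hlenfin, hget]
    · have hlt' : (PySem.Set.add acc c).length < 3 := by
        rcases pv_add_length acc c with h | h <;> omega
      rw [if_neg h3]
      exact ih _ hlt'


theorem pvF (xs acc : List Char) :
    xs.foldl PySem.Set.add acc = acc ++ (PySem.Set.ofList xs).filter (fun x => x ∉ acc) := by
  induction xs generalizing acc with
  | nil => simp [PySem.Set.ofList]
  | cons c rest ih =>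
    have hof : PySem.Set.ofList (c :: rest) = [c] ++ (PySem.Set.ofList rest).filter (fun x => x ≠ c) := by
      rw [PySem.Set.ofList_eq_foldl, List.foldl_cons]
      have hc : PySem.Set.add [] c = [c] := by simp [PySem.Set.add, PySem.Set.contains]
      rw [hc, ih]
      simp
    rw [List.foldl_cons, ih, hof]
    by_cases h : c ∈ acc
    · have ha : PySem.Set.add acc c = acc := by simp [PySem.Set.add, PySem.Set.contains, h]
      rw [ha]
      congr 1
      rw [List.filter_append, List.filter_filter]
      have h1 : List.filter (fun x => decide (x ∉ acc)) [c] = [] := by simp [h]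
      rw [h1, List.nil_append]
      apply List.filter_congr
      intro x hx
      by_cases hxc : x = c
      · subst hxc; simp [h]
      · simp [hxc]
    · have ha : PySem.Set.add acc c = acc ++ [c] := by simp [PySem.Set.add, PySem.Set.contains, h]
      rw [ha]
      rw [List.filter_append, List.filter_filter]
      have h1 : List.filter (fun x => decide (x ∉ acc)) [c] = [c] := by simp [h]
      rw [h1, List.append_assoc]
      congr 2
      apply List.filter_congr
      intro x hx
      by_cases h1 : x = c <;> by_cases h2 : x ∈ acc <;> simp [h1, h2, h]

def pvIdx (cs : List Char) (x : Char) : Nat := (PySem.List.index? cs x).getD 0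

theorem pv_dedup_cons (c : Char) (cs : List Char) :
    PySem.List.dedup (c :: cs) = c :: (PySem.List.dedup cs).filter (fun x => x ≠ c) := by
  simp only [PySem.List.dedup_eq_ofList, PySem.Set.ofList_eq_foldl, List.foldl_cons]
  have hc : PySem.Set.add [] c = [c] := by simp [PySem.Set.add, PySem.Set.contains]
  rw [hc, pvF]
  simp [← PySem.Set.ofList_eq_foldl]

theorem pvIdx_cons_self (c : Char) (cs : List Char) : pvIdx (c :: cs) c = 0 := by
  simp [pvIdx, List.idxOf?_cons]

theorem pvIdx_cons_of_ne (c x : Char) (cs : List Char) (hx : x ≠ c) (hm : x ∈ cs) :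
    pvIdx (c :: cs) x = pvIdx cs x + 1 := by
  obtain ⟨k, hk⟩ := Option.isSome_iff_exists.mp ((PySem.List.index?_isSome_iff cs x).mpr hm)
  simp only [pvIdx, PySem.List.index?_eq_idxOf?] at hk ⊢
  rw [List.idxOf?_cons, if_neg (by simp [Ne.symm hx]), hk]
  simp

theorem pv_dedup_idx_pairwise (cs : List Char) :
    (PySem.List.dedup cs).Pairwise (fun a b => pvIdx cs a < pvIdx cs b) := by
  induction cs with
  | nil => simp [PySem.List.dedup_eq_ofList, PySem.Set.ofList]
  | cons c rest ih =>
    rw [pv_dedup_cons]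
    constructor
    · intro b hb
      have hbne : b ≠ c := by simpa using (List.of_mem_filter hb)
      have hbr : b ∈ rest := (PySem.List.mem_dedup rest b).mp (List.mem_of_mem_filter hb)
      rw [pvIdx_cons_self, pvIdx_cons_of_ne c b rest hbne hbr]
      omega
    · have hsub := List.Pairwise.sublist (List.filter_sublist (l := PySem.List.dedup rest)
        (p := fun x => decide (x ≠ c))) ih
      refine hsub.imp_of_mem ?_
      intro a b ha hb hab
      have hane : a ≠ c := by simpa using (List.of_mem_filter ha)
      have hbne : b ≠ c := by simpa using (List.of_mem_filter hb)
      have har : a ∈ rest := (PySem.List.mem_dedup rest a).mp (List.mem_of_mem_filter ha)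
      have hbr : b ∈ rest := (PySem.List.mem_dedup rest b).mp (List.mem_of_mem_filter hb)
      rw [pvIdx_cons_of_ne c a rest hane har, pvIdx_cons_of_ne c b rest hbne hbr]
      omega

theorem pv_main (phrase : String) :
    (let cs := phrase.toList
     if (cs.foldl PySem.Set.add []).length ≥ 3 then
        String.ofList [(cs.foldl PySem.Set.add []).getD 2 ' ']
     else "Error: not enough unique characters") =
    (let cs := phrase.toList
     let firsts := PySem.List.sorted
       ((PySem.Set.ofList cs).map (fun c => (PySem.List.index? cs c).getD 0))
       (fun i => i) false
     if firsts.length ≥ 3 then String.ofList [cs.getD (firsts.getD 2 0) ' ']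
     else "Error: not enough unique characters") := by
  set cs := phrase.toList with hcs
  simp only []
  have hpw : ((PySem.Set.ofList cs).map (fun c => (PySem.List.index? cs c).getD 0)).Pairwise
      (fun a b => a < b) := by
    rw [← PySem.List.dedup_eq_ofList, List.pairwise_map]
    exact pv_dedup_idx_pairwise cs
  have hsorted : PySem.List.sorted
      ((PySem.Set.ofList cs).map (fun c => (PySem.List.index? cs c).getD 0)) (fun i => i) false
      = (PySem.Set.ofList cs).map (fun c => (PySem.List.index? cs c).getD 0) :=
    PySem.List.sorted_eq_of_perm_of_pairwise_lt _ _ _ (List.Perm.refl _) hpw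
  rw [hsorted, ← PySem.List.dedup_eq_ofList, ← PySem.Set.ofList_eq_foldl,
    ← PySem.List.dedup_eq_ofList, List.length_map]
  set d := PySem.List.dedup cs with hd
  by_cases h3 : 3 ≤ d.length
  · rw [if_pos h3, if_pos h3]
    have h2 : 2 < d.length := h3
    have hm2 : (d.map (fun c => (PySem.List.index? cs c).getD 0)).getD 2 0
        = (PySem.List.index? cs d[2]).getD 0 := by
      rw [List.getD_eq_getElem?_getD, List.getElem?_map, List.getElem?_eq_getElem h2]
      simp
    have hx : d[2] ∈ cs := (PySem.List.mem_dedup cs d[2]).mp (List.getElem_mem h2)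
    obtain ⟨k, hk⟩ := Option.isSome_iff_exists.mp ((PySem.List.index?_isSome_iff cs d[2]).mpr hx)
    obtain ⟨hklt, hcsk, -⟩ := PySem.List.getElem_of_index?_eq_some hk
    rw [hm2, hk]
    simp only [Option.getD_some]
    rw [List.getD_eq_getElem?_getD, List.getD_eq_getElem?_getD,
      List.getElem?_eq_getElem h2, List.getElem?_eq_getElem hklt]
    simp [hcsk]
  · rw [if_neg h3, if_neg h3]

-- ===== VERDICT (by name: the statement is the Claim_ definition above) =====
theorem third_unique_char_spec : Claim_equal_third_unique_char := by
  intro phrase _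
  show third_unique_char phrase = third_unique_char_alt phrase
  rw [third_unique_char, third_unique_char_alt, pv_loop_eq _ [] (by simp)]
  exact pv_main phrase
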